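-- pv_equiv track=rewrite | github.com/ronaldcanabarro/minera-referencias | filtros.py | filtro2
-- ===== SOURCE A (Python) =====
-- import string
--
-- def filtro2(texto_referencias):
--
--     num = len(texto_referencias)
--     for i in range(0, num):
--         texto_referencias[i] = texto_referencias[i].strip()
--         texto_referencias[i] = texto_referencias[i].replace("”",'')
--         texto_referencias[i] = texto_referencias[i].replace("“",'')
--         texto_referencias[i] = texto_referencias[i].replace("‘",'')
--         texto_referencias[i] = texto_referencias[i].replace("’",'')
--
--     referencia = []
--     lista_referencias = []
--     lista_letras = string.ascii_uppercase + 'ÁÉÍÓÚÀÈÌÒÙÃÕÂÊÎÔÛ'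
--     num = len(texto_referencias)
--     for i in range(0, num):
--
--         if i == len(texto_referencias) - 1 or i == len(texto_referencias) - 2:
--             referencia.append(texto_referencias[i])
--             pass
--         else:
--             if len(texto_referencias[i + 1]) > 1:
--                 if texto_referencias[i + 1] == texto_referencias[i + 1].upper():
--                     if texto_referencias[i + 1][0] in lista_letras and texto_referencias[i + 1][1] in lista_letras or texto_referencias[i + 1][0:2] == "__":
--                         if texto_referencias[i][-1] not in lista_letras:
--                             referencia.append(texto_referencias[i])
--                             lista_referencias.append(referencia)
--                             referencia = []
--                         else:
--                             referencia.append(texto_referencias[i])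
--                     else:
--                         referencia.append(texto_referencias[i])
--                 else:
--                     referencia.append(texto_referencias[i])
--             else:
--                 referencia.append(texto_referencias[i])
--
--     return lista_referencias
-- ===== SOURCE B (Python) =====
-- import string
--
-- def filtro2(texto_referencias):
--     for i in range(len(texto_referencias)):
--         texto_referencias[i] = texto_referencias[i].strip().replace("”", '').replace("“", '').replace("‘", '').replace("’", '')
--     lista_letras = string.ascii_uppercase + 'ÁÉÍÓÚÀÈÌÒÙÃÕÂÊÎÔÛ'
--
--     def eh_cabecalho(s):
--         return len(s) > 1 and s == s.upper() and ((s[0] in lista_letras and s[1] in lista_letras) or s[0:2] == "__")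
--
--     t = texto_referencias
--     n = len(t)
--     cortes = [i for i in range(n - 2) if eh_cabecalho(t[i + 1]) and t[i][-1] not in lista_letras]
--     saida = []
--     inicio = 0
--     for c in cortes:
--         saida.append(t[inicio:c + 1])
--         inicio = c + 1
--     return saida
-- ===== Notes on version B (the rewrite author's own statement) =====
-- stated objective: alternative
-- what changed: Replaces A's single stateful loop (accumulating a current group and flushing it at header boundaries, silently dropping the trailing group) by a two-phase decomposition: an eh_cabecalho predicate, a comprehension collecting cut indices, then slicing the cleaned list between consecutive cuts (the tail after the last cut is never emitted, matching A).
import Mathlib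
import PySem

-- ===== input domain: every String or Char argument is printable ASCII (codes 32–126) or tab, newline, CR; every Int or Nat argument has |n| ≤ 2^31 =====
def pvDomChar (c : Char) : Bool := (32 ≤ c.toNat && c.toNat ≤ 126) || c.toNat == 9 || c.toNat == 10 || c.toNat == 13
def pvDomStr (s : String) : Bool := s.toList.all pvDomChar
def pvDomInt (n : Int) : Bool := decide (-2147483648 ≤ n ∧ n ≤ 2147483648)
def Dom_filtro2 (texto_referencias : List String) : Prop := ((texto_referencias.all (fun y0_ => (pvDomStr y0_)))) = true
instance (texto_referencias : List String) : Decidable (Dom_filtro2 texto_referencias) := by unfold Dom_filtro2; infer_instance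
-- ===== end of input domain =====

-- B replaces A's single stateful grouping loop by a two-phase decomposition (header predicate,
-- cut-index list, then slices between cuts); equivalence is about the RETURN value — both Pythons
-- also mutate texto_referencias in place identically (the cleaning loop).


-- shared helpers (both Pythons perform this exact cleaning and use this exact alphabet)
def limpa (s : String) : String :=
  PySem.Str.replace (PySem.Str.replace (PySem.Str.replace (PySem.Str.replace
    (PySem.Str.strip s) "”" "") "“" "") "‘" "") "’" ""

def letras : List Char := "ABCDEFGHIJKLMNOPQRSTUVWXYZÁÉÍÓÚÀÈÌÒÙÃÕÂÊÎÔÛ".toList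

-- ===== PORT A =====
-- 'x in lista_letras' for the single character s[0]/s[1]/s[-1] is exact as char membership.
-- s[-1] is PySem.List.pyGetD … (-1) ' ': Pre_ guarantees the line is nonempty whenever this
-- index is reached (Python raises IndexError there; see Pre_filtro2).
def filtro2 (texto_referencias : List String) : List (List String) :=
  let t := texto_referencias.map limpa
  let num := t.length
  ((List.range num).foldl (fun (st : List String × List (List String)) (i : Nat) =>
    let referencia := st.1
    let lista := st.2
    if i == num - 1 || i == num - 2 then
      (referencia ++ [PySem.List.pyGetD t (i : Int) ""], lista)
    else
      let nxt := (PySem.List.pyGetD t ((i : Int) + 1) "").toList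
      if PySem.Chars.len nxt > 1 then
        if nxt = PySem.Chars.upper nxt then
          if (PySem.List.pyGetD nxt (0 : Int) ' ' ∈ letras ∧ PySem.List.pyGetD nxt (1 : Int) ' ' ∈ letras) ∨
             PySem.List.slice nxt (some 0) (some 2) = ['_', '_'] then
            if PySem.List.pyGetD (PySem.List.pyGetD t (i : Int) "").toList (-1) ' ' ∉ letras then
              ([], lista ++ [referencia ++ [PySem.List.pyGetD t (i : Int) ""]])
            else
              (referencia ++ [PySem.List.pyGetD t (i : Int) ""], lista)
          else
            (referencia ++ [PySem.List.pyGetD t (i : Int) ""], lista)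
        else
          (referencia ++ [PySem.List.pyGetD t (i : Int) ""], lista)
      else
        (referencia ++ [PySem.List.pyGetD t (i : Int) ""], lista)) ([], [])).2

-- ===== PORT B =====
def ehCabecalho (s : String) : Bool :=
  decide (PySem.Chars.len s.toList > 1) &&
  decide (s.toList = PySem.Chars.upper s.toList) &&
  (decide (PySem.List.pyGetD s.toList (0 : Int) ' ' ∈ letras ∧ PySem.List.pyGetD s.toList (1 : Int) ' ' ∈ letras) ||
   decide (PySem.List.slice s.toList (some 0) (some 2) = ['_', '_']))

def filtro2_alt (texto_referencias : List String) : List (List String) :=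
  let t := texto_referencias.map limpa
  let n := t.length
  let cortes := (List.range (n - 2)).filter (fun (i : Nat) =>
    ehCabecalho (PySem.List.pyGetD t ((i : Int) + 1) "") &&
    !(letras.contains (PySem.List.pyGetD (PySem.List.pyGetD t (i : Int) "").toList (-1) ' ')))
  (cortes.foldl (fun (st : Nat × List (List String)) (c : Nat) =>
      (c + 1, st.2 ++ [PySem.List.slice t (some (st.1 : Int)) (some ((c : Int) + 1))])) (0, [])).2

-- ===== PRECONDITION & SPEC =====
-- Pre_ excludes exactly the inputs on which Python A (and B) raises IndexError: a line that
-- cleans to the empty string immediately followed by an all-caps header line (its [-1] is read).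
def Pre_filtro2 (texto_referencias : List String) : Prop :=
  ∀ i, i < texto_referencias.length → i + 2 < texto_referencias.length →
    ehCabecalho (limpa (texto_referencias.getD (i + 1) "")) = true →
    limpa (texto_referencias.getD i "") ≠ ""
instance (texto_referencias : List String) : Decidable (Pre_filtro2 texto_referencias) := by
  unfold Pre_filtro2; infer_instance
def pvWitness_filtro2 : List String := ["Almeida, J. ref.", "BBB 2001.", "tail one", "tail two"]
def Spec_filtro2 (texto_referencias : List String) (out : List (List String)) : Prop := out = filtro2_alt texto_referencias
instance (texto_referencias : List String) (out : List (List String)) : Decidable (Spec_filtro2 texto_referencias out) := by unfold Spec_filtro2; infer_instance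

-- ===== CLAIM (what is proved, stated in full; the proofs are below) =====
def Claim_equal_filtro2 : Prop := ∀ (texto_referencias : List String), Dom_filtro2 texto_referencias → Pre_filtro2 texto_referencias → Spec_filtro2 texto_referencias (filtro2 texto_referencias)

-- ===== LEMMAS AND PROOFS =====

-- canonical cut condition and canonical step of A's loop
def corta (t : List String) (i : Nat) : Bool :=
  !(i == t.length - 1 || i == t.length - 2) &&
  ehCabecalho (t.getD (i + 1) "") &&
  !(letras.contains (PySem.List.pyGetD (t.getD i "").toList (-1) ' '))

def passo (t : List String) (st : List String × List (List String)) (i : Nat) :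
    List String × List (List String) :=
  if corta t i then ([], st.2 ++ [st.1 ++ [t.getD i ""]]) else (st.1 ++ [t.getD i ""], st.2)

def bpasso (t : List String) (st : Nat × List (List String)) (c : Nat) :
    Nat × List (List String) :=
  (c + 1, st.2 ++ [(t.drop st.1).take (c + 1 - st.1)])

lemma take_succ_getD (t : List String) (a k : Nat) (ha : a ≤ k) (hk : k < t.length) :
    (t.drop a).take (k - a) ++ [t.getD k ""] = (t.drop a).take (k + 1 - a) := by
  have h1 : k + 1 - a = (k - a) + 1 := by omega
  rw [h1, List.take_add_one, List.getElem?_drop, Nat.add_sub_cancel' ha,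
    List.getElem?_eq_getElem hk, List.getD_eq_getElem t "" hk]
  rfl

lemma nested_if_eq {α : Type} (P1 P2 P3 P4 : Prop) [Decidable P1] [Decidable P2]
    [Decidable P3] [Decidable P4] (x y : α) :
    (if P1 then if P2 then if P3 then if P4 then x else y else y else y else y)
    = if ((P1 ∧ P2) ∧ P3) ∧ P4 then x else y := by
  by_cases p1 : P1 <;> by_cases p2 : P2 <;> by_cases p3 : P3 <;> by_cases p4 : P4 <;>
    simp [p1, p2, p3, p4]

lemma filtro2_eq_fold (texto : List String) :
    filtro2 texto = ((List.range (texto.map limpa).length).foldl (passo (texto.map limpa)) ([], [])).2 := by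
  unfold filtro2
  dsimp only
  congr 2
  funext st i
  set t := texto.map limpa with ht
  have h1 : PySem.List.pyGetD t (i : Int) "" = t.getD i "" := by
    simp [PySem.List.pyGetD_natCast]
  have h2 : PySem.List.pyGetD t ((i : Int) + 1) "" = t.getD (i + 1) "" := by
    rw [show ((i : Int) + 1) = ((i + 1 : Nat) : Int) by push_cast; ring,
      PySem.List.pyGetD_natCast]
  rw [h1, h2]
  simp only [passo, corta, ehCabecalho]
  by_cases hs : (i == t.length - 1 || i == t.length - 2) = true
  · rw [if_pos hs]
    have hfa : (!(i == t.length - 1 || i == t.length - 2)) = false := by rw [hs]; rfl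
    simp only [hfa, Bool.false_and, Bool.false_eq_true, if_false]
  · simp only [Bool.not_eq_true] at hs
    simp only [hs, Bool.false_eq_true, if_false, Bool.not_false, Bool.true_and,
      Bool.and_eq_true, Bool.or_eq_true, decide_eq_true_eq, List.contains_eq_mem,
      Bool.not_eq_eq_eq_not, Bool.not_true, decide_eq_false_iff_not]
    exact nested_if_eq _ _ _ _ _ _

lemma cortes_eq (t : List String) :
    (List.range (t.length - 2)).filter (fun (i : Nat) =>
      ehCabecalho (PySem.List.pyGetD t ((i : Int) + 1) "") &&
      !(letras.contains (PySem.List.pyGetD (PySem.List.pyGetD t (i : Int) "").toList (-1) ' ')))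
      = (List.range t.length).filter (corta t) := by
  have hpred : ∀ i ∈ List.range (t.length - 2),
      (ehCabecalho (PySem.List.pyGetD t ((i : Int) + 1) "") &&
       !(letras.contains (PySem.List.pyGetD (PySem.List.pyGetD t (i : Int) "").toList (-1) ' ')))
      = corta t i := by
    intro i hi
    rw [List.mem_range] at hi
    have h1 : PySem.List.pyGetD t (i : Int) "" = t.getD i "" := by
      simp [PySem.List.pyGetD_natCast]
    have h2 : PySem.List.pyGetD t ((i : Int) + 1) "" = t.getD (i + 1) "" := by
      rw [show ((i : Int) + 1) = ((i + 1 : Nat) : Int) by push_cast; ring,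
        PySem.List.pyGetD_natCast]
    have hs : (i == t.length - 1 || i == t.length - 2) = false := by
      simp only [Bool.or_eq_false_iff, beq_eq_false_iff_ne]
      omega
    rw [corta, h1, h2, hs]
    simp
  rw [List.filter_congr hpred]
  by_cases h0 : t.length < 2
  · have hle : t.length - 2 = 0 := by omega
    rw [hle]
    simp only [List.range_zero, List.filter_nil]
    symm
    rw [List.filter_eq_nil_iff]
    intro a ha
    rw [List.mem_range] at ha
    have hb : (a == t.length - 1 || a == t.length - 2) = true := by
      simp only [Bool.or_eq_true, beq_iff_eq]
      omega
    simp [corta, hb]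
  · conv_rhs => rw [show t.length = (t.length - 2) + 2 by omega, List.range_add]
    rw [List.filter_append]
    have hnil : List.filter (corta t) ((List.range 2).map (fun x => t.length - 2 + x)) = [] := by
      rw [List.filter_eq_nil_iff]
      intro j hj
      simp only [List.mem_map, List.mem_range] at hj
      obtain ⟨a, ha, rfl⟩ := hj
      have hb : ((t.length - 2 + a) == t.length - 1 || (t.length - 2 + a) == t.length - 2) = true := by
        simp only [Bool.or_eq_true, beq_iff_eq]
        omega
      simp [corta, hb]
    rw [hnil, List.append_nil]

lemma filtro2_alt_eq_fold (texto : List String) :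
    filtro2_alt texto =
      (((List.range ((texto.map limpa).length)).filter (corta (texto.map limpa))).foldl
        (bpasso (texto.map limpa)) (0, [])).2 := by
  unfold filtro2_alt
  dsimp only
  rw [cortes_eq]
  congr 2
  funext st c
  rw [bpasso, show ((c : Int) + 1) = ((c + 1 : Nat) : Int) by push_cast; ring,
    PySem.List.slice_natCast]

lemma inv (t : List String) : ∀ k, k ≤ t.length →
    ((List.range k).foldl (passo t) ([], [])) =
      ((t.drop (((List.range k).filter (corta t)).foldl (bpasso t) (0, [])).1).take
        (k - (((List.range k).filter (corta t)).foldl (bpasso t) (0, [])).1),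
       (((List.range k).filter (corta t)).foldl (bpasso t) (0, [])).2) ∧
    (((List.range k).filter (corta t)).foldl (bpasso t) (0, [])).1 ≤ k := by
  intro k
  induction k with
  | zero => simp
  | succ k ih =>
    intro hk
    obtain ⟨h1, h2⟩ := ih (by omega)
    rw [List.range_succ, List.filter_append, List.foldl_append, List.foldl_append, h1]
    set s := ((List.range k).filter (corta t)).foldl (bpasso t) (0, []) with hsdef
    have hklen : k < t.length := by omega
    by_cases hc : corta t k = true
    · have hf : List.filter (corta t) [k] = [k] := by simp [hc]
      rw [hf]
      simp only [List.foldl_cons, List.foldl_nil]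
      refine ⟨?_, by simp [bpasso]⟩
      unfold passo bpasso
      rw [if_pos hc]
      refine Prod.ext ?_ ?_
      · simp
      · show s.2 ++ [(t.drop s.1).take (k - s.1) ++ [t.getD k ""]]
          = s.2 ++ [(t.drop s.1).take (k + 1 - s.1)]
        rw [take_succ_getD t s.1 k h2 hklen]
    · have hcf : corta t k = false := by simpa using hc
      have hf : List.filter (corta t) [k] = [] := by simp [hcf]
      rw [hf]
      simp only [List.foldl_cons, List.foldl_nil]
      refine ⟨?_, by omega⟩
      unfold passo
      rw [if_neg (by simp [hcf])]
      refine Prod.ext ?_ ?_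
      · exact take_succ_getD t s.1 k h2 hklen
      · rfl

-- ===== VERDICT (by name: the statement is the Claim_ definition above) =====
theorem filtro2_spec : Claim_equal_filtro2 := by
  intro texto _ _
  unfold Spec_filtro2
  rw [filtro2_eq_fold, filtro2_alt_eq_fold]
  rw [(inv (texto.map limpa) (texto.map limpa).length le_rfl).1]
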